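-- pv_equiv track=rewrite | github.com/vedantp2905/CrossLingual_Analysis | lexical_analysis.py | create_label_map_2
-- ===== SOURCE A (Python) =====
-- def filter_label_map(label_map):
--     filtered_label_map = {}
--     unique_labels = set()
--
--     for tag, word_list in label_map.items():
--         if len(word_list) >= 6:
--             filtered_label_map[tag] = set(word_list)
--             unique_labels.add(tag)
--
--     return filtered_label_map, unique_labels
--
-- def create_label_map_2(sentences, labels):
--     label_map = {}
--     unique_labels = set()
--
--     for sentence_index, label_line in enumerate(labels):
--         label_tokens = label_line.split()
--         word_tokens = sentences[sentence_index].split()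
--
--         for word_index, label in enumerate(label_tokens):
--             cluster_words = []
--
--             if label in label_map:
--                 cluster_words = label_map[label]
--
--             cluster_words.append(word_tokens[word_index])
--             label_map[label] = cluster_words
--             unique_labels.add(label)
--
--     return filter_label_map(label_map)
-- ===== SOURCE B (Python) =====
-- def create_label_map_2(sentences, labels):
--     # Flatten everything into (label, word) pairs, then group per label
--     # by scanning the flat pair list.
--     pairs = []
--     for i in range(len(labels)):
--         label_tokens = labels[i].split()
--         word_tokens = sentences[i].split()
--         for j in range(len(label_tokens)):
--             pairs.append((label_tokens[j], word_tokens[j]))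
--
--     order = list(dict.fromkeys(lab for lab, _ in pairs))
--
--     filtered = {}
--     kept = set()
--     for lab in order:
--         words = [w for l, w in pairs if l == lab]
--         if len(words) >= 6:
--             filtered[lab] = set(words)
--             kept.add(lab)
--     return filtered, kept
-- ===== Notes on version B (the rewrite author's own statement) =====
-- stated objective: alternative
-- what changed: A grows a dict of word lists incrementally while walking the lines; B first flattens everything into a (label, word) pair list, dedups the labels in first-occurrence order, and computes each label's group by scanning the flat pair list.
import Mathlib
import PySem

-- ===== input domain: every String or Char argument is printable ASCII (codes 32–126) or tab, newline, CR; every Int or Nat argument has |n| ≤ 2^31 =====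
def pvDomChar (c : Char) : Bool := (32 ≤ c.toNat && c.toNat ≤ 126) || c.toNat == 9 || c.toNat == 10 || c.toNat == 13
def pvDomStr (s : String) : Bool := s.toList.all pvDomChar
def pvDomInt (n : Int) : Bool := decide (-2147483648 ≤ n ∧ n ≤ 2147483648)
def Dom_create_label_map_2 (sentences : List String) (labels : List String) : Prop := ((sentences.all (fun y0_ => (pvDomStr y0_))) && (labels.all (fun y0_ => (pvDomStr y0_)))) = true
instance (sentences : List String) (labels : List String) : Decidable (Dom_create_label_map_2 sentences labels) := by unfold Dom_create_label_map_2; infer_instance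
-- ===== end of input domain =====

-- B replaces A's incremental dict-of-growing-lists with a flatten-then-group pass:
-- build the flat (label, word) pair list first, then compute each label's group by
-- scanning it (objective: alternative decomposition, not faster).

-- ===== PORT A =====
def filter_label_map (label_map : PySem.Dict String (List String)) :
    (List (String × List String)) × List String :=
  let r := label_map.items.foldl
    (fun (st : PySem.Dict String (List String) × PySem.Set String) p =>
      if 6 ≤ p.2.length then
        (st.1.insert p.1 (PySem.Set.ofList p.2), PySem.Set.add st.2 p.1)
      else st)
    (PySem.Dict.empty, PySem.Set.empty)
  (r.1.items, r.2)

def create_label_map_2 (sentences : List String) (labels : List String) :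
    (List (String × List String)) × List String :=
  let st := (PySem.List.enumerate labels).foldl
    (fun (st : PySem.Dict String (List String) × PySem.Set String) si =>
      let label_tokens := PySem.Str.split₀ si.2
      let word_tokens := PySem.Str.split₀ (PySem.List.pyGetD sentences si.1 "")  -- IndexError excluded by Pre_
      (PySem.List.enumerate label_tokens).foldl
        (fun st wi =>
          let cluster_words : List String :=
            if st.1.contains wi.2 then st.1.getD wi.2 [] else []
          let cluster_words := cluster_words ++ [PySem.List.pyGetD word_tokens wi.1 ""]  -- IndexError excluded by Pre_
          (st.1.insert wi.2 cluster_words, PySem.Set.add st.2 wi.2)) st)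
    (PySem.Dict.empty, PySem.Set.empty)
  filter_label_map st.1

-- ===== PORT B =====
def create_label_map_2_alt (sentences : List String) (labels : List String) :
    (List (String × List String)) × List String :=
  let pairs := (PySem.List.pyRange 0 (PySem.List.len labels)).foldl
    (fun (acc : List (String × String)) i =>
      let label_tokens := PySem.Str.split₀ (PySem.List.pyGetD labels i "")
      let word_tokens := PySem.Str.split₀ (PySem.List.pyGetD sentences i "")  -- IndexError excluded by Pre_
      (PySem.List.pyRange 0 (PySem.List.len label_tokens)).foldl
        (fun acc j =>
          acc ++ [(PySem.List.pyGetD label_tokens j "",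
                   PySem.List.pyGetD word_tokens j "")]) acc)  -- IndexError excluded by Pre_
    []
  let order := PySem.List.dedup (pairs.map (·.1))
  let st := order.foldl
    (fun (st : PySem.Dict String (List String) × PySem.Set String) lab =>
      let words := (pairs.filter (fun p => p.1 == lab)).map (·.2)
      if 6 ≤ words.length then
        (st.1.insert lab (PySem.Set.ofList words), PySem.Set.add st.2 lab)
      else st)
    (PySem.Dict.empty, PySem.Set.empty)
  (st.1.items, st.2)

-- ===== PRECONDITION & SPEC =====
-- Pre_ excludes exactly the inputs on which A raises IndexError: a label line with no
-- matching sentence, or a label line with more whitespace tokens than its sentence.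
def Pre_create_label_map_2 (sentences : List String) (labels : List String) : Prop :=
  labels.length ≤ sentences.length ∧
  ∀ i, i < labels.length →
    (PySem.Str.split₀ (labels.getD i "")).length ≤
    (PySem.Str.split₀ (sentences.getD i "")).length
instance (sentences : List String) (labels : List String) :
    Decidable (Pre_create_label_map_2 sentences labels) := by
  unfold Pre_create_label_map_2; infer_instance

def pvWitness_create_label_map_2 : List String × List String :=
  (["the cat sat on the mat", "a dog"], ["N N V P N N", "D N"])

def Spec_create_label_map_2 (sentences : List String) (labels : List String)
    (out : (List (String × List String)) × List String) : Prop :=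
  out = create_label_map_2_alt sentences labels
instance (sentences : List String) (labels : List String)
    (out : (List (String × List String)) × List String) :
    Decidable (Spec_create_label_map_2 sentences labels out) := by
  unfold Spec_create_label_map_2; infer_instance

-- ===== CLAIM (what is proved, stated in full; the proofs are below) =====
def Claim_equal_create_label_map_2 : Prop :=
  ∀ (sentences : List String) (labels : List String),
    Dom_create_label_map_2 sentences labels →
    Pre_create_label_map_2 sentences labels →
    Spec_create_label_map_2 sentences labels (create_label_map_2 sentences labels)

-- ===== LEMMAS AND PROOFS =====

-- The state both main loops thread: (label → words dict, set of labels).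
abbrev LMSt := PySem.Dict String (List String) × PySem.Set String

-- One grouping step on a (label, word) pair, as A performs it.
def lmStep (st : LMSt) (p : String × String) : LMSt :=
  (st.1.insert p.1 (st.1.getD p.1 [] ++ [p.2]), PySem.Set.add st.2 p.1)

-- The flat (label, word) pair list both programs process, line by line.
def lmPairs (sentences : List String) (labels : List String) : List (String × String) :=
  (PySem.List.enumerate labels).flatMap (fun si =>
    let label_tokens := PySem.Str.split₀ si.2
    let word_tokens := PySem.Str.split₀ (PySem.List.pyGetD sentences si.1 "")
    (PySem.List.enumerate label_tokens).map
      (fun wi => (wi.2, PySem.List.pyGetD word_tokens wi.1 "")))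

-- A's guarded lookup is just getD.
lemma guarded_getD (d : PySem.Dict String (List String)) (k : String) :
    (if d.contains k then d.getD k [] else []) = d.getD k [] := by
  by_cases h : d.contains k = true
  · simp [h]
  · simp [h, PySem.Dict.getD_of_not_contains d [] (by simpa using h)]

-- A's nested loops are the fold of lmStep over the flat pair list.
lemma A_fold_eq (sentences labels : List String) (st : LMSt) :
    (PySem.List.enumerate labels).foldl
      (fun (st : LMSt) si =>
        let label_tokens := PySem.Str.split₀ si.2
        let word_tokens := PySem.Str.split₀ (PySem.List.pyGetD sentences si.1 "")
        (PySem.List.enumerate label_tokens).foldl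
          (fun st wi =>
            let cluster_words : List String :=
              if st.1.contains wi.2 then st.1.getD wi.2 [] else []
            let cluster_words := cluster_words ++ [PySem.List.pyGetD word_tokens wi.1 ""]
            (st.1.insert wi.2 cluster_words, PySem.Set.add st.2 wi.2)) st) st
    = (lmPairs sentences labels).foldl lmStep st := by
  unfold lmPairs
  rw [List.foldl_flatMap]
  apply PySem.List.foldl_congr_mem
  intro st' si _
  simp only [List.foldl_map]
  apply PySem.List.foldl_congr_mem
  intro st'' wi _
  simp only [lmStep, guarded_getD]

-- B's pair-building loops compute the same flat pair list.
lemma B_pairs_eq (sentences labels : List String) :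
    (PySem.List.pyRange 0 (PySem.List.len labels)).foldl
      (fun (acc : List (String × String)) i =>
        let label_tokens := PySem.Str.split₀ (PySem.List.pyGetD labels i "")
        let word_tokens := PySem.Str.split₀ (PySem.List.pyGetD sentences i "")
        (PySem.List.pyRange 0 (PySem.List.len label_tokens)).foldl
          (fun acc j =>
            acc ++ [(PySem.List.pyGetD label_tokens j "",
                     PySem.List.pyGetD word_tokens j "")]) acc) []
    = lmPairs sentences labels := by
  unfold lmPairs
  rw [PySem.List.enumerate_eq_map_pyRange labels "", List.flatMap_map]
  rw [PySem.List.foldl_congr_mem _ _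
    (fun (acc : List (String × String)) i =>
      acc ++ (PySem.List.pyRange 0
          (PySem.List.len (PySem.Str.split₀ (PySem.List.pyGetD labels i "")))).map
        (fun j => (PySem.List.pyGetD (PySem.Str.split₀ (PySem.List.pyGetD labels i "")) j "",
                   PySem.List.pyGetD (PySem.Str.split₀ (PySem.List.pyGetD sentences i "")) j "")))
    [] (fun acc i _ => PySem.List.foldl_append_singleton_eq_map _ _ _)]
  rw [PySem.List.foldl_append_eq_flatMap]
  apply List.flatMap_congr
  intro i _
  simp only [PySem.List.enumerate_eq_map_pyRange _ "", List.map_map]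
  rfl

-- The dict component of the lmStep fold ignores the set component.
lemma fold_fst (ps : List (String × String)) (st : LMSt) :
    (ps.foldl lmStep st).1
      = ps.foldl (fun d p => d.insert p.1 (d.getD p.1 [] ++ [p.2])) st.1 := by
  induction ps generalizing st with
  | nil => rfl
  | cons p ps ih => exact ih (lmStep st p)

-- Value of the grouping dict at any label: the words of that label, in order.
lemma grouped_getD (ps : List (String × String)) (c : String) :
    (ps.foldl (fun d p => d.insert p.1 (d.getD p.1 [] ++ [p.2])) PySem.Dict.empty).getD c []
      = (ps.filter (fun p => p.1 == c)).map (·.2) := by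
  have h := PySem.Dict.getD_foldl_modify_append ps (PySem.Dict.empty (κ := String) (ν := List String)) c
  simpa [PySem.Dict.getD_empty] using h

-- Keys of the grouping dict: the labels, deduplicated in first-occurrence order.
lemma grouped_keys (ps : List (String × String)) :
    (ps.foldl (fun d p => d.insert p.1 (d.getD p.1 [] ++ [p.2])) PySem.Dict.empty).keys
      = PySem.List.dedup (ps.map (·.1)) := by
  have h := PySem.Dict.keys_foldl_insert_key ps Prod.fst
    (fun d x => d.getD x.1 [] ++ [x.2]) PySem.Dict.empty
  simpa [PySem.Dict.keys_empty] using h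

lemma grouped_nodup (ps : List (String × String)) :
    (ps.foldl (fun d p => d.insert p.1 (d.getD p.1 [] ++ [p.2])) PySem.Dict.empty).keys.Nodup :=
  PySem.Dict.nodup_keys_foldl_insert_key ps Prod.fst
    (fun d x => d.getD x.1 [] ++ [x.2]) PySem.Dict.empty
    (by simp [PySem.Dict.keys_empty])

-- ===== VERDICT (by name: the statement is the Claim_ definition above) =====
theorem create_label_map_2_spec : Claim_equal_create_label_map_2 := by
  intro sentences labels _ _
  unfold Spec_create_label_map_2 create_label_map_2 create_label_map_2_alt filter_label_map
  simp only [A_fold_eq, B_pairs_eq, fold_fst]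
  rw [PySem.Dict.items_eq_map_keys _ (grouped_nodup (lmPairs sentences labels)) []]
  rw [grouped_keys]
  rw [List.map_congr_left (fun k _ => by rw [grouped_getD] :
    ∀ k ∈ PySem.List.dedup ((lmPairs sentences labels).map (·.1)),
      (k, ((lmPairs sentences labels).foldl
            (fun d p => d.insert p.1 (d.getD p.1 [] ++ [p.2])) PySem.Dict.empty).getD k [])
        = (k, ((lmPairs sentences labels).filter (fun p => p.1 == k)).map (·.2)))]
  rw [List.foldl_map]
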